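/- GENERATED by mk_final_copies.py from the proof of the farm's unit `start_decoder.R12a` (farm:start_decoder.R12a.1: Proof.lean) as the
   re-elaboration sweep compiled it — do not edit. -/
import Asan.CheckWalk
import Vorbis.Spec.Reader
import Vorbis.Spec.Units.start_decoder_R12a
import Vorbis.Spec.Worked.start_decoder_R12a_Lemmas

open X86 X86.User Asan Vorbis Vorbis.Spec Vorbis.Spec.StartDecoder

set_option maxRecDepth 4000
set_option maxHeartbeats 4000000

namespace Vorbis.Spec.start_decoder_R12a

/-- **Segment R12a of `start_decoder`** (the head `cut310` 0x116545 … 0x11654c; then 0x116482 … 0x11648a, returns into `cut305`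
0x11648f; or 0x116552 … 0x11655a, `jmp` to the head `cut270` 0x115f22 of loop 4095): the loop test `movzx eax, byte [rbx + 10H] ; cmp
eax, r13d ; jg` (no check call: the record is inside the image's data space). `j < submaps`: the discarded `get_bits(f, 8)` (the
template of R12b: `MapLoop.carry`, `MapCur.carry`, the prefix of MP6 from the record's bytes). `j ≥ submaps`: `++i` on the counter
`[R + 10H]` (`mapLoop_next`), `r15d = r14d` (no constraint), R8 with `i + 1`. -/
theorem segR12a_walk {Lay : Layout} (hLay : Lay.hi = 0x1000000) {μ : Microarch} (hμ : UserX.MicroOK μ) {u₀ : State}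
    (hcode : HasCodeNat Lay u₀ Vorbis.L.start_decoder.entry Vorbis.Code.code_start_decoder.nat Vorbis.L.start_decoder.size)
    (h_get_bits : ∀ (others : List Obj) (frames : List (Nat × FrameLayout)) (Blk : Block → Prop) (len : Nat),
      Calls Lay μ Vorbis.WayInv (Vorbis.conv u₀) Vorbis.L.get_bits.entry (Vorbis.Spec.get_bits.spec others frames Blk len))
    {g : Ghost} {i j : Nat} {v : State} {A7 A7c Ai : Arena} {A : Arena × List Obj}
    (hpt : InR12 u₀ g Vorbis.L.start_decoder.cut310 i j A7 A7c Ai A v) :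
    ReachVia Lay μ WayInv v (fun w => AtR8 u₀ g (i + 1) w ∨ AtR12a u₀ g i j w) := by
  have hl := hpt.loop
  have hcur := hpt.cur
  have hfr := hl.frame
  have hh := hl.hand
  have hm := hl.mid
  have hp : Pos g A := hl.secPt.pos
  have he := hfr.entry
  v_entry he
  obtain ⟨hRa, hR8⟩ := hfr.r_eq
  simp only [steady, Ghost.RA] at hRa
  simp only [depth] at he_room he_stack
  have hflo := hp.f_lo
  have hf2 := hp.f_hi
  have hf3 := hp.f_stack
  simp only [Ghost.RA] at hf3
  have hRn : (addr g.R).toNat = g.R := toNat_addr _ (by omega)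
  have hfn : (addr g.f).toNat = g.f := toNat_addr _ (by omega)
  -- the record `m(i)` lies in the mapping table, inside the arena's buffer
  obtain ⟨_, hT1, hT2⟩ := hl.table
  have h1 := hl.maps.MP1
  have hlt := hcur.lt
  have p9 := hp.ar_lo
  have p10 := hp.ar_hi
  have p11 := hp.ar_stack
  have p7 := hp.objOut
  have em : mapAt g v.mem i = stb_vorbis.mapping v.mem g.f + 56 * i := rfl
  have h3 := hcur.MP3
  have hjle := hpt.j_le
  have r_sub : v.mem.readLE (addr (mapAt g v.mem i) + 16) 1 = Mapping.submaps v.mem (mapAt g v.mem i) := by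
    simp only [vfield, vacc, voff]
  have r_cnt : v.mem.readLE (addr g.R + 16) 4 = i := by
    have h := hl.cnt
    simp only [StartDecoder.slot] at h
    simp only [vfield]
    exact h
  obtain ⟨m, hmdef⟩ : ∃ m, mapAt g v.mem i = m := ⟨_, rfl⟩
  rw [hmdef] at em r_sub h3 hjle
  obtain ⟨S, hSdef⟩ : ∃ S, Mapping.submaps v.mem m = S := ⟨_, rfl⟩
  rw [hSdef] at r_sub h3 hjle
  have hmn : (addr m).toNat = m := toNat_addr _ (by omega)
  have hasM : Lay.Has (addr m) 56 := by
    apply has_addr Lay _ _ (by omega)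
    · unfold Layout.lo
      omega
    · rw [hLay]
      omega
  have w_rip := hfr.rip
  have c_rsp := hfr.rsp
  have c_rbp := hl.rbp
  have c_rbx : v.reg .rbx = addr m := by
    rw [← hmdef]
    exact hpt.rbx
  have c_r13 := hpt.r13
  have w_eq : Mem.EqOn Vorbis.L.textLo Vorbis.L.textHi u₀.mem v.mem := hfr.code
  have hdf : v.flags .df = false := (show abiInv _ from hfr.inv).1
  have hmx : v.mxcsr &&& 0x1F80 = 0x1F80 := (show abiInv _ from hfr.inv).2
  have hsse := Vorbis.sseOK_of_abiInv hfr.inv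
  have hgb := h_get_bits A.2 g.frames' (g.Blk A) g.len
  u_walk hcode [hμ.vendor] until [Vorbis.L.start_decoder.cut305, Vorbis.L.start_decoder.cut270] span [Vorbis.L.textLo, Vorbis.L.textHi] side (v_side)
  case call_inv => v_inv
  case pre_11648a =>
    have hun : ShadowUntouched v.mem s_11648a.mem := by v_untouched
    have hs0 : Mem.SameExcept [⟨g.R - 8, g.R⟩] v.mem s_11648a.mem := by u_same
    have hbits := (Vorbis.Spec.Reader.reader_of_window hm.bits hs0 (by omega)).1
    refine ⟨⟨shadowPre_call hfr (by rw [w_rsp]; u_omega) hun, ?_, ?_⟩, ?_⟩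
    · rw [w_rdi, hfn]
      exact readerEnv_mid hh hm
    · rw [w_rdi, hfn]
      exact hbits
    · rw [bitsArg_def, w_rsi]
      decide
  · -- the returned state (0x11648f, cut305): `j < submaps`
    v_after_call w_rsp_11648a w_mem_11648a
    simp only [w_rdi_11648a, hfn] at w_same
    have hs : Mem.SameExcept [⟨g.R - 360, g.R⟩, ⟨g.f + 48, g.f + 56⟩, ⟨g.f + 84, g.f + 96⟩, ⟨g.f + 136, g.f + 144⟩,
        ⟨g.f + 1484, g.f + 1749⟩, ⟨g.f + 1752, g.f + 1784⟩] v.mem s_11648ar.mem := by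
      u_same
    have hws : ∀ w, w ∈ [(⟨g.R - 360, g.R⟩ : Span), ⟨g.f + 48, g.f + 56⟩, ⟨g.f + 84, g.f + 96⟩, ⟨g.f + 136, g.f + 144⟩,
        ⟨g.f + 1484, g.f + 1749⟩, ⟨g.f + 1752, g.f + 1784⟩] → MapWin g Ai A (mapAt g v.mem i) w := by
      intro w hw
      simp only [List.mem_cons, List.mem_nil_iff, or_false] at hw
      unfold MapWin
      rcases hw with rfl | rfl | rfl | rfl | rfl | rfl
      · left
        simp only []
        omega
      · right; right; right; right; left
        simp only []
        omega
      · right; right; right; right; left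
        simp only []
        omega
      · right; right; right; right; right; left
        simp only []
        omega
      · right; right; right; right; right; right; left
        simp only []
        omega
      · right; right; right; right; right; right; right; left
        simp only []
        omega
    have hpost : GetBitsSpecPost (g.Blk A) g.len (s_11648a.reg .rdi).toNat (bitsArg s_11648a) s_11648a s_11648ar := w_post
    rw [w_rdi_11648a, hfn] at hpost
    have hun : ShadowUntouched v.mem s_11648ar.mem := by v_untouched
    have hl' : MapLoop u₀ g Vorbis.L.start_decoder.cut305 i A7 A7c Ai A s_11648ar :=
      hl.carry hcur.lt hs hun hws hpost.bits.bits w_rip w_rsp (Vorbis.conv_code_eqOn w_code) w_inv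
        (by rw [w_kept.get .rbp rfl])
    obtain ⟨ecount, _, emap, echn, _⟩ := hl.fields_eq hcur.lt hs hws
    have hobj := hl.objEq hcur.lt hs hws
    -- no window of a reader call meets the arena's buffer: every range inside it reads the same
    have harena : ∀ lo hi : Nat, A.1.B ≤ lo → hi ≤ A.1.B + A.1.L → Mem.EqOn lo hi v.mem s_11648ar.mem := by
      intro lo hi q1 q2
      apply hs.eqOn
      intro w hw
      simp only [List.mem_cons, List.mem_nil_iff, or_false] at hw
      rcases hw with rfl | rfl | rfl | rfl | rfl | rfl <;> simp only [] <;> omega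
    -- the record `m(i)` and its `chan` block lie inside the arena's buffer
    have hrec : Mem.EqOn (mapAt g v.mem i) (mapAt g v.mem i + 56) v.mem s_11648ar.mem :=
      harena _ _ (by omega) (by omega)
    have hCin := arena_inside hm.arena hcur.MP2.1
    simp only [] at hCin
    have hchan : (Block.mk (Mapping.chan v.mem (mapAt g v.mem i)) (Off.sizeof.MappingChannel * nchan v.mem g.f)).Kept
        v.mem s_11648ar.mem := by
      apply Block.Kept.of_sameExcept hs
      · intro w hw
        simp only [List.mem_cons, List.mem_nil_iff, or_false] at hw
        rcases hw with rfl | rfl | rfl | rfl | rfl | rfl <;> simp only [] <;> omega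
      · simp only []
        omega
    have hcur' : MapCur g (Since Ai A.1) s_11648ar.mem i 12 :=
      hcur.carry ecount emap echn (hrec.mono (Nat.le_refl _) (by omega)) (by omega) (fun _ => hchan)
    have e_sub : Mapping.submaps s_11648ar.mem (mapAt g v.mem i) = Mapping.submaps v.mem (mapAt g v.mem i) := by
      simp only [vacc, voff]
      exact hrec.u8 _ (by omega) (by omega) (by omega)
    have hj16 : j ≤ 16 := by omega
    have hjS : j < S := by
      rw [cnt_toInt_small j hj16, zext8_toInt_small S h3.2] at hbr_11654c
      omega
    have hdone : ∀ s : Nat, s < j → Mapping.SubmapOK s_11648ar.mem g.f (mapAt g s_11648ar.mem i) s := by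
      intro s hs'
      rw [emap]
      have hold := hpt.done s hs'
      have ef : Mapping.submap_floor s_11648ar.mem (mapAt g v.mem i) s = Mapping.submap_floor v.mem (mapAt g v.mem i) s := by
        simp only [vacc, voff]
        exact hrec.u8 _ (by omega) (by omega) (by omega)
      have er : Mapping.submap_residue s_11648ar.mem (mapAt g v.mem i) s =
          Mapping.submap_residue v.mem (mapAt g v.mem i) s := by
        simp only [vacc, voff]
        exact hrec.u8 _ (by omega) (by omega) (by omega)
      have efc : stb_vorbis.floor_count s_11648ar.mem g.f = stb_vorbis.floor_count v.mem g.f := by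
        simp only [vacc, voff]
        exact hobj.i32 176 (by decide)
      have erc : stb_vorbis.residue_count s_11648ar.mem g.f = stb_vorbis.residue_count v.mem g.f := by
        simp only [vacc, voff]
        exact hobj.i32 320 (by decide)
      unfold Mapping.SubmapOK at hold ⊢
      rw [ef, er, efc, erc]
      exact hold
    have hin : InR12 u₀ g Vorbis.L.start_decoder.cut305 i j A7 A7c Ai A s_11648ar :=
      { loop := hl'
        rbx := by
          rw [emap, w_kept.get .rbx rfl]
          exact hpt.rbx
        cur := hcur'
        r13 := by
          rw [w_kept.get .r13 rfl]
          exact hpt.r13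
        j_le := by
          rw [emap, e_sub]
          exact hpt.j_le
        done := hdone }
    refine ReachVia.done (Or.inr ⟨A7, A7c, Ai, A, hin, ?_⟩)
    rw [emap, e_sub, hmdef, hSdef]
    exact hjS
  · -- the exit arm (0x116552 … 0x11655a): `j ≥ submaps`, `++i`, the head 0x115f22 of loop 4095 with `i + 1`
    have hdf' : s_11655a.flags .df = false := by
      rw [w_flags]
      simp only [X86.User.df_setStatus]
      exact hdf
    have hmx' : s_11655a.mxcsr &&& 0x1F80 = 0x1F80 := by
      rw [w_mxcsr]
      exact hmx
    have eslot : addr g.R + 16 = addr (g.R + 0x10) := by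
      simp only [vfield]
    have hR16 : (addr (g.R + 0x10)).toNat = g.R + 0x10 := toNat_addr _ (by omega)
    have hs : Mem.SameExcept [⟨g.R + 0x10, g.R + 0x14⟩] v.mem s_11655a.mem := by
      rw [w_mem, eslot]
      apply Mem.SameExcept.writeLE
      · rw [hR16]
        omega
      · refine ⟨_, List.mem_cons_self, ?_, ?_⟩
        · rw [hR16]
          exact Nat.le_refl _
        · rw [hR16]
          exact Nat.le_refl _
    have hun : ShadowUntouched v.mem s_11655a.mem := by v_untouched
    have hrsp : s_11655a.reg .rsp = addr g.R := by
      rw [w_kept.get .rsp rfl]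
      exact c_rsp
    have hi64 : i < 64 := by omega
    have hval : (BitVec.ofNat 32 i + 1#32).toNat = i + 1 := by
      simp only [BitVec.toNat_add, BitVec.toNat_ofNat]
      omega
    have hcnt : StartDecoder.slot g s_11655a.mem 0x10 = i + 1 := by
      show s_11655a.mem.readLE (addr (g.R + 0x10)) 4 = i + 1
      rw [w_mem, eslot, Mem.readLE_writeLE_same _ _ _ _ (by decide), hval]
      omega
    have hj16 : j ≤ 16 := by omega
    have hSj : S ≤ j := by
      rw [cnt_toInt_small j hj16, zext8_toInt_small S h3.2] at hbr_11654c
      omega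
    have hexit : Mapping.submaps v.mem (mapAt g v.mem i) ≤ j := by
      rw [hmdef, hSdef]
      exact hSj
    have hl' : MapLoop u₀ g pc_R8 (i + 1) A7 A7c A.1 A s_11655a :=
      mapLoop_next hl hcur hpt.done hexit hs hun hcnt w_rip hrsp w_eq (Vorbis.abiInv_of hdf' hmx')
        (by rw [w_kept.get .rbp rfl])
    exact ReachVia.done (Or.inl ⟨A7, A7c, A, hl'⟩)

end Vorbis.Spec.start_decoder_R12a

/-- The unit `start_decoder.R12a`: `segR12a_walk` at every entry state. -/
theorem Vorbis.Spec.Worked.start_decoder_R12a_ok : Vorbis.Spec.start_decoder_R12a.Statement := by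
  intro Lay hLay μ hμ u₀ hcode h_get_bits g i j v hat
  obtain ⟨A7, A7c, Ai, A, hpt⟩ := hat
  exact Vorbis.Spec.start_decoder_R12a.segR12a_walk hLay hμ hcode h_get_bits hpt
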